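-- pv_equiv track=rewrite | github.com/GitCheckUp/GitCheckup | GitCheckup/views.py | reverse_unicorn_cake
-- ===== SOURCE A (Python) =====
-- def reverse_unicorn_cake(text):
-- 	result = ""
-- 	for i in range(len(text)):
-- 		current = ord(text[i])
-- 		if (i%2 == 0):
-- 			result += chr(current - 1)
-- 		else:
-- 			result += chr(current + 1)
--
-- 	return result
-- ===== SOURCE B (Python) =====
-- def reverse_unicorn_cake(text):
--     out = []
--     n = len(text)
--     i = 0
--     while i + 1 < n:
--         out.append(chr(ord(text[i]) - 1))
--         out.append(chr(ord(text[i + 1]) + 1))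
--         i += 2
--     if i < n:
--         out.append(chr(ord(text[i]) - 1))
--     return "".join(out)
-- ===== Notes on version B (the rewrite author's own statement) =====
-- stated objective: alternative
-- what changed: Replaces the indexed loop with per-index parity tests and string += by a two-characters-per-step walk (decrement, then increment, leftover decrement) collecting into a list joined once, with no parity test per character.
import Mathlib
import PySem

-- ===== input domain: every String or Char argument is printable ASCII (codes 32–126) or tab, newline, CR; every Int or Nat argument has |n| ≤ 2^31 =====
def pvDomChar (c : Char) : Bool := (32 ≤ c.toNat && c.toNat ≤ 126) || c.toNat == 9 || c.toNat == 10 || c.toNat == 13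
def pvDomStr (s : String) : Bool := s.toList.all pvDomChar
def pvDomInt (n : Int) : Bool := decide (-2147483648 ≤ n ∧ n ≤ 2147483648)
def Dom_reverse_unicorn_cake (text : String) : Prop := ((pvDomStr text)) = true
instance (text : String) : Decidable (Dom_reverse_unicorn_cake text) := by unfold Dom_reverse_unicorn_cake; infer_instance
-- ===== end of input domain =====

-- B replaces the per-index parity loop by a two-chars-per-step walk (alternative decomposition, same cost).


-- ===== PORT A =====
-- for i in range(len(text)): result += chr(ord(text[i]) ∓ 1) by parity of i
def reverse_unicorn_cake (text : String) : String :=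
  String.ofList ((List.range text.toList.length).foldl
    (fun result i =>
      let current := (text.toList.getD i (Char.ofNat 0)).toNat
      if i % 2 == 0 then result ++ [Char.ofNat (current - 1)]
      else result ++ [Char.ofNat (current + 1)]) [])

-- ===== PORT B =====
-- two characters per step: decrement, increment, leftover single char decremented
def pvGoB : List Char → List Char
  | [] => []
  | [a] => [Char.ofNat (a.toNat - 1)]
  | a :: b :: t => Char.ofNat (a.toNat - 1) :: Char.ofNat (b.toNat + 1) :: pvGoB t

def reverse_unicorn_cake_alt (text : String) : String :=
  String.ofList (pvGoB text.toList)

-- ===== PRECONDITION & SPEC =====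
def Spec_reverse_unicorn_cake (text : String) (out : String) : Prop := out = reverse_unicorn_cake_alt text
instance (text : String) (out : String) : Decidable (Spec_reverse_unicorn_cake text out) := by unfold Spec_reverse_unicorn_cake; infer_instance

-- ===== CLAIM (what is proved, stated in full; the proofs are below) =====
def Claim_equal_reverse_unicorn_cake : Prop := ∀ (text : String), Dom_reverse_unicorn_cake text → Spec_reverse_unicorn_cake text (reverse_unicorn_cake text)

-- ===== LEMMAS AND PROOFS =====

-- the character A emits at index i of list l
def pvF (l : List Char) (i : Nat) : Char :=
  if i % 2 == 0 then Char.ofNat ((l.getD i (Char.ofNat 0)).toNat - 1)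
  else Char.ofNat ((l.getD i (Char.ofNat 0)).toNat + 1)

theorem pv_foldl_map (l : List Char) :
    ∀ (idx : List Nat) (acc : List Char),
      idx.foldl
        (fun result i =>
          let current := (l.getD i (Char.ofNat 0)).toNat
          if i % 2 == 0 then result ++ [Char.ofNat (current - 1)]
          else result ++ [Char.ofNat (current + 1)]) acc
      = acc ++ idx.map (pvF l)
  | [], acc => by simp
  | i :: is, acc => by
    simp only [List.foldl, List.map]
    rw [pv_foldl_map l is]
    by_cases h : i % 2 == 0 <;> simp [pvF, h]

theorem pvF_shift (a b : Char) (t : List Char) (i : Nat) :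
    pvF (a :: b :: t) (i + 2) = pvF t i := by
  unfold pvF
  have : (i + 2) % 2 = i % 2 := by omega
  simp [this, List.getD]

theorem pv_range_map_goB : ∀ (l : List Char),
    (List.range l.length).map (pvF l) = pvGoB l := by
  intro l
  induction l using pvGoB.induct with
  | case1 => simp [pvGoB]
  | case2 a => simp [pvGoB, pvF, List.getD]
  | case3 a b t ih =>
    show (List.range (t.length + 1 + 1)).map (pvF (a :: b :: t)) = _
    rw [List.range_succ_eq_map, List.range_succ_eq_map]
    simp only [List.map_cons, List.map_map]
    have h0 : pvF (a :: b :: t) 0 = Char.ofNat (a.toNat - 1) := by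
      simp [pvF, List.getD]
    have h1 : pvF (a :: b :: t) (Nat.succ 0) = Char.ofNat (b.toNat + 1) := by
      simp [pvF, List.getD]
    have hm : (List.range t.length).map (pvF (a :: b :: t) ∘ Nat.succ ∘ Nat.succ)
        = (List.range t.length).map (pvF t) := by
      apply List.map_congr_left
      intro i _
      show pvF (a :: b :: t) (i + 1 + 1) = pvF t i
      have : i + 1 + 1 = i + 2 := by omega
      rw [this, pvF_shift]
    rw [h0, h1, hm, ih]
    rfl

-- ===== VERDICT (by name: the statement is the Claim_ definition above) =====
theorem reverse_unicorn_cake_spec : Claim_equal_reverse_unicorn_cake := by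
  intro text _
  unfold Spec_reverse_unicorn_cake reverse_unicorn_cake reverse_unicorn_cake_alt
  rw [pv_foldl_map text.toList, List.nil_append, pv_range_map_goB]
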